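-- pv_equiv track=rewrite | github.com/sidobagga/orbe_docker | sql_helpers.py | maybe_metric_query
-- ===== SOURCE A (Python) =====
-- from typing import Dict, Any, Optional, List, Union, Tuple
--
-- def maybe_metric_query(msg: str) -> Optional[tuple]:
--     """Detect if a message is asking for metric data and return (metric, agg) tuple"""
--     q = msg.lower()
--
--     # Highest/Max patterns
--     if any(pattern in q for pattern in ["highest tam", "max tam", "largest tam", "biggest tam"]):
--         return ("tam", "max")
--     if any(pattern in q for pattern in ["highest arr", "max arr", "largest arr"]):
--         return ("arr", "max")
--     if any(pattern in q for pattern in ["highest revenue", "max revenue", "largest revenue"]):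
--         return ("revenue", "max")
--     if any(pattern in q for pattern in ["highest valuation", "max valuation", "largest valuation"]):
--         return ("valuation", "max")
--
--     # Sum/Total patterns
--     if any(pattern in q for pattern in ["total tam", "sum tam", "sum of tam"]):
--         return ("tam", "sum")
--     if any(pattern in q for pattern in ["total arr", "sum arr", "sum of arr"]):
--         return ("arr", "sum")
--     if any(pattern in q for pattern in ["total revenue", "sum revenue", "sum of revenue"]):
--         return ("revenue", "sum")
--
--     # Average patterns
--     if any(pattern in q for pattern in ["average tam", "avg tam", "mean tam"]):
--         return ("tam", "avg")
--     if any(pattern in q for pattern in ["average arr", "avg arr", "mean arr"]):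
--         return ("arr", "avg")
--
--     # List/Show all patterns
--     if any(pattern in q for pattern in ["list tam", "tam for all", "show tam", "all tam"]):
--         return ("tam", None)
--     if any(pattern in q for pattern in ["list arr", "arr for all", "show arr", "all arr"]):
--         return ("arr", None)
--     if any(pattern in q for pattern in ["list revenue", "revenue for all", "show revenue", "all revenue"]):
--         return ("revenue", None)
--     if any(pattern in q for pattern in ["list valuation", "valuation for all", "show valuation", "all valuation"]):
--         return ("valuation", None)
--
--     # Portfolio/deals patterns
--     if any(pattern in q for pattern in ["portfolio tam", "my deals tam", "deals tam"]):
--         return ("tam", None)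
--     if any(pattern in q for pattern in ["portfolio companies", "my companies", "my portfolio"]) and "tam" in q:
--         return ("tam", None)
--
--     return None
-- ===== SOURCE B (Python) =====
-- # B: flat pattern->rule dictionary generated compositionally (agg-word x metric grids),
-- # then one exhaustive pass over the whole dictionary selecting the matching rule of
-- # minimal rank (no short-circuit cascade).
--
-- _METRICS = ["tam", "arr", "revenue", "valuation"]
--
--
-- def _build_table():
--     table = {}
--     rank = 0
--
--     def add(patterns, metric, agg, needs_tam=False):
--         nonlocal rank
--         for p in patterns:
--             table[p] = (rank, metric, agg, needs_tam)
--         rank += 1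
--
--     for m in _METRICS:
--         pats = [w + " " + m for w in ("highest", "max", "largest")]
--         if m == "tam":
--             pats.append("biggest tam")
--         add(pats, m, "max")
--     for m in _METRICS[:3]:
--         add([w + " " + m for w in ("total", "sum", "sum of")], m, "sum")
--     for m in _METRICS[:2]:
--         add([w + " " + m for w in ("average", "avg", "mean")], m, "avg")
--     for m in _METRICS:
--         add(["list " + m, m + " for all", "show " + m, "all " + m], m, None)
--     add(["portfolio tam", "my deals tam", "deals tam"], "tam", None)
--     add(["portfolio companies", "my companies", "my portfolio"], "tam", None, needs_tam=True)
--     return table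
--
--
-- _TABLE = _build_table()
--
--
-- def maybe_metric_query(msg: str):
--     """Detect if a message is asking for metric data and return (metric, agg) tuple"""
--     q = msg.lower()
--     best = None
--     for pat, (rank, metric, agg, needs_tam) in _TABLE.items():
--         if pat in q and (not needs_tam or "tam" in q):
--             if best is None or rank < best[0]:
--                 best = (rank, metric, agg)
--     return None if best is None else (best[1], best[2])
-- ===== Notes on version B (the rewrite author's own statement) =====
-- stated objective: alternative
-- what changed: Replaces the 15-branch short-circuit if-cascade by a flat pattern-to-rule dictionary generated compositionally from agg-word x metric grids, scanned exhaustively once while selecting the matching rule of minimal rank.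
import Mathlib
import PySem

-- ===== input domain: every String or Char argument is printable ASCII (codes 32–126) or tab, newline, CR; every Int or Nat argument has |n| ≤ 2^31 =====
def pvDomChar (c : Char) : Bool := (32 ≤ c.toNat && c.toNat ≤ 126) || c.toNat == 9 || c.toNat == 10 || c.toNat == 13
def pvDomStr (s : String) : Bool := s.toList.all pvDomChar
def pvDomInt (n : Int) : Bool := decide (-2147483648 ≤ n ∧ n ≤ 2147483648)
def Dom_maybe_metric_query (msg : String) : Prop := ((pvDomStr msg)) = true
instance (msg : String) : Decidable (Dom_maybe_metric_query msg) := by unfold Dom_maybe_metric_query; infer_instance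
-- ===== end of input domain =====

-- B replaces A's short-circuit if-cascade by a flat pattern→rule table generated
-- compositionally and one exhaustive min-rank scan over it (objective: alternative).

-- ===== PORT A =====
-- literal transliteration of A's if-cascade; 'p in q' = PySem.Str.isIn p q
def maybe_metric_query (msg : String) : Option (String × Option String) :=
  let q := PySem.Str.lower msg
  if ["highest tam", "max tam", "largest tam", "biggest tam"].any (fun p => PySem.Str.isIn p q) then
    some ("tam", some "max")
  else if ["highest arr", "max arr", "largest arr"].any (fun p => PySem.Str.isIn p q) then
    some ("arr", some "max")
  else if ["highest revenue", "max revenue", "largest revenue"].any (fun p => PySem.Str.isIn p q) then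
    some ("revenue", some "max")
  else if ["highest valuation", "max valuation", "largest valuation"].any (fun p => PySem.Str.isIn p q) then
    some ("valuation", some "max")
  else if ["total tam", "sum tam", "sum of tam"].any (fun p => PySem.Str.isIn p q) then
    some ("tam", some "sum")
  else if ["total arr", "sum arr", "sum of arr"].any (fun p => PySem.Str.isIn p q) then
    some ("arr", some "sum")
  else if ["total revenue", "sum revenue", "sum of revenue"].any (fun p => PySem.Str.isIn p q) then
    some ("revenue", some "sum")
  else if ["average tam", "avg tam", "mean tam"].any (fun p => PySem.Str.isIn p q) then
    some ("tam", some "avg")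
  else if ["average arr", "avg arr", "mean arr"].any (fun p => PySem.Str.isIn p q) then
    some ("arr", some "avg")
  else if ["list tam", "tam for all", "show tam", "all tam"].any (fun p => PySem.Str.isIn p q) then
    some ("tam", none)
  else if ["list arr", "arr for all", "show arr", "all arr"].any (fun p => PySem.Str.isIn p q) then
    some ("arr", none)
  else if ["list revenue", "revenue for all", "show revenue", "all revenue"].any (fun p => PySem.Str.isIn p q) then
    some ("revenue", none)
  else if ["list valuation", "valuation for all", "show valuation", "all valuation"].any (fun p => PySem.Str.isIn p q) then
    some ("valuation", none)
  else if ["portfolio tam", "my deals tam", "deals tam"].any (fun p => PySem.Str.isIn p q) then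
    some ("tam", none)
  else if ["portfolio companies", "my companies", "my portfolio"].any (fun p => PySem.Str.isIn p q)
          && PySem.Str.isIn "tam" q then
    some ("tam", none)
  else
    none

-- ===== PORT B =====
-- Source B's compositional table generation: each entry is (pattern, rank, metric, agg, needsTam)
def pvMetrics : List String := ["tam", "arr", "revenue", "valuation"]

def pvAdd (rank : Nat) (pats : List String) (metric : String) (agg : Option String)
    (needsTam : Bool) : List (String × Nat × String × Option String × Bool) :=
  pats.map (fun p => (p, rank, metric, agg, needsTam))

def pvTable : List (String × Nat × String × Option String × Bool) :=
  (pvMetrics.zipIdx.flatMap (fun e =>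
     pvAdd e.2 ((["highest", "max", "largest"].map (fun w => w ++ " " ++ e.1))
                ++ (if e.1 = "tam" then ["biggest tam"] else [])) e.1 (some "max") false))
  ++ ((pvMetrics.take 3).zipIdx.flatMap (fun e =>
     pvAdd (4 + e.2) (["total", "sum", "sum of"].map (fun w => w ++ " " ++ e.1)) e.1 (some "sum") false))
  ++ ((pvMetrics.take 2).zipIdx.flatMap (fun e =>
     pvAdd (7 + e.2) (["average", "avg", "mean"].map (fun w => w ++ " " ++ e.1)) e.1 (some "avg") false))
  ++ (pvMetrics.zipIdx.flatMap (fun e =>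
     pvAdd (9 + e.2) (["list " ++ e.1, e.1 ++ " for all", "show " ++ e.1, "all " ++ e.1]) e.1 none false))
  ++ pvAdd 13 ["portfolio tam", "my deals tam", "deals tam"] "tam" none false
  ++ pvAdd 14 ["portfolio companies", "my companies", "my portfolio"] "tam" none true

-- the loop body of Source B's exhaustive min-rank scan
def pvStep (q : String) (best : Option (Nat × String × Option String))
    (e : String × Nat × String × Option String × Bool) : Option (Nat × String × Option String) :=
  if PySem.Str.isIn e.1 q && (!e.2.2.2.2 || PySem.Str.isIn "tam" q) then
    match best with
    | none => some (e.2.1, e.2.2.1, e.2.2.2.1)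
    | some b => if e.2.1 < b.1 then some (e.2.1, e.2.2.1, e.2.2.2.1) else best
  else best

def maybe_metric_query_alt (msg : String) : Option (String × Option String) :=
  let q := PySem.Str.lower msg
  match pvTable.foldl (pvStep q) none with
  | none => none
  | some b => some (b.2.1, b.2.2)

-- ===== PRECONDITION & SPEC =====
def Spec_maybe_metric_query (msg : String) (out : Option (String × Option String)) : Prop := out = maybe_metric_query_alt msg
instance (msg : String) (out : Option (String × Option String)) : Decidable (Spec_maybe_metric_query msg out) := by unfold Spec_maybe_metric_query; infer_instance

-- ===== CLAIM (what is proved, stated in full; the proofs are below) =====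
def Claim_equal_maybe_metric_query : Prop := ∀ (msg : String), Dom_maybe_metric_query msg → Spec_maybe_metric_query msg (maybe_metric_query msg)

-- ===== LEMMAS AND PROOFS =====

-- the generated table, evaluated (proof device only)
def pvTableLit : List (String × Nat × String × Option String × Bool) :=
  [
    ("highest tam", 0, "tam", some "max", false),
    ("max tam", 0, "tam", some "max", false),
    ("largest tam", 0, "tam", some "max", false),
    ("biggest tam", 0, "tam", some "max", false),
    ("highest arr", 1, "arr", some "max", false),
    ("max arr", 1, "arr", some "max", false),
    ("largest arr", 1, "arr", some "max", false),
    ("highest revenue", 2, "revenue", some "max", false),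
    ("max revenue", 2, "revenue", some "max", false),
    ("largest revenue", 2, "revenue", some "max", false),
    ("highest valuation", 3, "valuation", some "max", false),
    ("max valuation", 3, "valuation", some "max", false),
    ("largest valuation", 3, "valuation", some "max", false),
    ("total tam", 4, "tam", some "sum", false),
    ("sum tam", 4, "tam", some "sum", false),
    ("sum of tam", 4, "tam", some "sum", false),
    ("total arr", 5, "arr", some "sum", false),
    ("sum arr", 5, "arr", some "sum", false),
    ("sum of arr", 5, "arr", some "sum", false),
    ("total revenue", 6, "revenue", some "sum", false),
    ("sum revenue", 6, "revenue", some "sum", false),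
    ("sum of revenue", 6, "revenue", some "sum", false),
    ("average tam", 7, "tam", some "avg", false),
    ("avg tam", 7, "tam", some "avg", false),
    ("mean tam", 7, "tam", some "avg", false),
    ("average arr", 8, "arr", some "avg", false),
    ("avg arr", 8, "arr", some "avg", false),
    ("mean arr", 8, "arr", some "avg", false),
    ("list tam", 9, "tam", none, false),
    ("tam for all", 9, "tam", none, false),
    ("show tam", 9, "tam", none, false),
    ("all tam", 9, "tam", none, false),
    ("list arr", 10, "arr", none, false),
    ("arr for all", 10, "arr", none, false),
    ("show arr", 10, "arr", none, false),
    ("all arr", 10, "arr", none, false),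
    ("list revenue", 11, "revenue", none, false),
    ("revenue for all", 11, "revenue", none, false),
    ("show revenue", 11, "revenue", none, false),
    ("all revenue", 11, "revenue", none, false),
    ("list valuation", 12, "valuation", none, false),
    ("valuation for all", 12, "valuation", none, false),
    ("show valuation", 12, "valuation", none, false),
    ("all valuation", 12, "valuation", none, false),
    ("portfolio tam", 13, "tam", none, false),
    ("my deals tam", 13, "tam", none, false),
    ("deals tam", 13, "tam", none, false),
    ("portfolio companies", 14, "tam", none, true),
    ("my companies", 14, "tam", none, true),
    ("my portfolio", 14, "tam", none, true) ]

lemma pvTable_eval : pvTable = pvTableLit := by rfl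

-- once a best of rank r is held and every remaining rank is ≥ r, the scan keeps it
lemma pvFoldl_keep (q : String) (r : Nat) (m : String) (a : Option String)
    (l : List (String × Nat × String × Option String × Bool))
    (h : ∀ e ∈ l, r ≤ e.2.1) :
    l.foldl (pvStep q) (some (r, m, a)) = some (r, m, a) := by
  induction l with
  | nil => rfl
  | cons e rest ih =>
    have h0 : r ≤ e.2.1 := h e (by simp)
    have hrest : ∀ x ∈ rest, r ≤ x.2.1 := fun x hx => h x (by simp [hx])
    simp only [List.foldl_cons, pvStep]
    split
    · rw [if_neg (by omega)]
      exact ih hrest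
    · exact ih hrest

-- the short-circuit first-match view of the scan (proof device only)
def pvFirst (q : String) :
    List (String × Nat × String × Option String × Bool) → Option (Nat × String × Option String)
  | [] => none
  | e :: rest =>
    if PySem.Str.isIn e.1 q && (!e.2.2.2.2 || PySem.Str.isIn "tam" q) then
      some (e.2.1, e.2.2.1, e.2.2.2.1)
    else pvFirst q rest

lemma pvFoldl_eq_first (q : String)
    (l : List (String × Nat × String × Option String × Bool))
    (hs : l.Pairwise (fun x y => x.2.1 ≤ y.2.1)) :
    l.foldl (pvStep q) none = pvFirst q l := by
  induction l with
  | nil => rfl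
  | cons e rest ih =>
    rw [List.pairwise_cons] at hs
    simp only [List.foldl_cons, pvFirst]
    by_cases hc : (PySem.Str.isIn e.1 q && (!e.2.2.2.2 || PySem.Str.isIn "tam" q)) = true
    · rw [if_pos hc]
      show rest.foldl (pvStep q) (pvStep q none e) = _
      simp only [pvStep, hc, if_pos]
      exact pvFoldl_keep q _ _ _ rest hs.1
    · rw [if_neg hc]
      show rest.foldl (pvStep q) (pvStep q none e) = _
      simp only [pvStep, hc, Bool.false_eq_true, ite_false]
      exact ih hs.2

lemma pv_match_map (o : Option (Nat × String × Option String)) :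
    (match o with
     | none => (none : Option (String × Option String))
     | some b => some (b.2.1, b.2.2)) = o.map (fun b => (b.2.1, b.2.2)) := by
  cases o <;> rfl

lemma pv_if_or {α : Sort _} (a b : Bool) (x y : α) :
    (if (a || b) = true then x else y) = if a = true then x else if b = true then x else y := by
  cases a <;> simp

lemma pv_and_or (a b c : Bool) : ((a || b) && c) = (a && c || b && c) := by
  cases a <;> cases b <;> cases c <;> rfl

-- ===== VERDICT (by name: the statement is the Claim_ definition above) =====
theorem maybe_metric_query_spec : Claim_equal_maybe_metric_query := by
  intro msg _
  unfold Spec_maybe_metric_query maybe_metric_query maybe_metric_query_alt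
  have hfold := pvFoldl_eq_first (PySem.Str.lower msg) pvTableLit (by decide)
  simp only [pvTable_eval, pv_match_map]
  rw [hfold]
  simp only [pvTableLit, pvFirst, List.any_cons, List.any_nil, Bool.or_false, Bool.not_false,
    Bool.not_true, Bool.and_true, Bool.false_or, Bool.true_or, pv_and_or, pv_if_or,
    apply_ite (Option.map (fun (b : Nat × String × Option String) => (b.2.1, b.2.2))),
    Option.map_some, Option.map_none]
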